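-- pv_equiv track=rewrite | github.com/remowxdx/AoC-2022 | aoc05.py | read_crates
-- ===== SOURCE A (Python) =====
-- def read_crates(line):
--     result = {}
--     stack = 0
--     for col, char in enumerate(line):
--         if col % 4 == 1:
--             if char != " ":
--                 result[stack] = char
--             stack += 1
--     return result
-- ===== SOURCE B (Python) =====
-- def read_crates(line):
--     return {i: c for i, c in enumerate(line[1::4]) if c != " "}
-- ===== Notes on version B (the rewrite author's own statement) =====
-- stated objective: simpler
-- what changed: Replaces the full scan over every column with its modulo test and hand-maintained stack counter by a one-line dict comprehension over the stride slice line[1::4], with enumerate supplying the stack index.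
import Mathlib
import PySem

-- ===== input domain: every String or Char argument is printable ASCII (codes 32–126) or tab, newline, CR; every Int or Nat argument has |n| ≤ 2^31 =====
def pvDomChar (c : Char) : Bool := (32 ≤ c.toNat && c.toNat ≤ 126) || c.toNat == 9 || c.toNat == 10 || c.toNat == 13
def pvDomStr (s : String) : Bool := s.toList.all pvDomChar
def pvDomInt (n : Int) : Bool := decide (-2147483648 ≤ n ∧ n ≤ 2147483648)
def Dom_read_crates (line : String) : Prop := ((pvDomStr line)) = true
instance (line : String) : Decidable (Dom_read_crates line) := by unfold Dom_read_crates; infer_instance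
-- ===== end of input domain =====

-- B replaces A's full column scan (modulo test + hand-maintained stack counter) by a dict
-- comprehension over the stride slice line[1::4]; same return value, simpler decomposition.


-- ===== PORT A =====
-- loop body of A: 'if col % 4 == 1: (if char != " ": result[stack] = char); stack += 1'
def pvStepA (st : PySem.Dict Int String × Int) (p : Int × Char) : PySem.Dict Int String × Int :=
  if PySem.Int.mod p.1 4 == 1 then
    ((if p.2 ≠ ' ' then st.1.insert st.2 (String.mk [p.2]) else st.1), st.2 + 1)
  else st

def read_crates (line : String) : List (Int × String) :=
  ((PySem.List.enumerate line.toList 0).foldl pvStepA (PySem.Dict.empty, 0)).1.items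

-- ===== PORT B =====
-- body of B's dict comprehension: '{i: c for i, c in … if c != " "}'
def pvStepB (d : PySem.Dict Int String) (p : Int × Char) : PySem.Dict Int String :=
  if p.2 ≠ ' ' then d.insert p.1 (String.mk [p.2]) else d

def read_crates_alt (line : String) : List (Int × String) :=
  ((PySem.List.enumerate ((PySem.List.slice? line.toList (some 1) none 4).getD []) 0).foldl
      pvStepB PySem.Dict.empty).items

-- ===== PRECONDITION & SPEC =====
def Spec_read_crates (line : String) (out : List (Int × String)) : Prop := out = read_crates_alt line
instance (line : String) (out : List (Int × String)) : Decidable (Spec_read_crates line out) := by unfold Spec_read_crates; infer_instance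

-- ===== CLAIM (what is proved, stated in full; the proofs are below) =====
def Claim_equal_read_crates : Prop := ∀ (line : String), Dom_read_crates line → Spec_read_crates line (read_crates line)

-- ===== LEMMAS AND PROOFS =====

-- the elements of l at indices 1, 5, 9, … (what Python's l[1::4] yields)
def pvStride4 {α : Type} : List α → List α
  | [] => []
  | [_] => []
  | _ :: b :: t => b :: pvStride4 (t.drop 2)
  termination_by l => l.length
  decreasing_by simp; omega

lemma pvStepA_skip (st : PySem.Dict Int String × Int) (i : Int) (ch : Char)
    (h : i % 4 ≠ 1) : pvStepA st (i, ch) = st := by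
  simp [pvStepA, h]

lemma pvStepA_hit (st : PySem.Dict Int String × Int) (i : Int) (ch : Char)
    (h : i % 4 = 1) :
    pvStepA st (i, ch) = ((if ch ≠ ' ' then st.1.insert st.2 (String.mk [ch]) else st.1), st.2 + 1) := by
  simp [pvStepA, h]

-- crate pairs read off a stride list starting at stack index k
def pvCrates : List Char → Int → List (Int × String)
  | [], _ => []
  | c :: t, k => (if c ≠ ' ' then [(k, String.mk [c])] else []) ++ pvCrates t (k + 1)

lemma pvSlice_filterMap {α : Type} (l : List α) :
    PySem.List.slice? l (some 1) none 4 =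
      some (List.filterMap (fun k : Nat => l[(1 + 4 * (k : Int)).toNat]?)
        (List.range (((l.length : Int) + 2) / 4).toNat)) := by
  simp only [PySem.List.slice?, PySem.List.sliceIndices]
  norm_num
  rcases Nat.lt_or_ge l.length 2 with h | h
  · have h01 : l.length = 0 ∨ l.length = 1 := by omega
    rcases h01 with h0 | h1
    · simp [h0]
    · simp [h1]
  · have hmin : min 1 ((l.length : Int)) = 1 := by omega
    simp [hmin]
    rw [if_pos (by omega : 1 < l.length)]
    have he : ((l.length : Int) - 1 + 4 - 1) = ((l.length : Int) + 2) := by ring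
    rw [he]

lemma pvFilterMap_stride {α : Type} (N : Nat) : ∀ (l : List α), l.length ≤ N →
    List.filterMap (fun k : Nat => l[(1 + 4 * (k : Int)).toNat]?)
        (List.range (((l.length : Int) + 2) / 4).toNat) = pvStride4 l := by
  induction N with
  | zero =>
    intro l hl
    have : l = [] := List.eq_nil_of_length_eq_zero (by omega)
    subst this
    simp [pvStride4]
  | succ N ih =>
    intro l hl
    rcases l with _ | ⟨a, _ | ⟨b, t⟩⟩
    · simp [pvStride4]
    · simp [pvStride4]
    · have hq : ((((a :: b :: t).length : Int) + 2) / 4).toNat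
          = ((t.length : Int) / 4).toNat + 1 := by
        simp only [List.length_cons]
        omega
      rw [hq, List.range_succ_eq_map]
      simp only [List.filterMap_cons, List.filterMap_map]
      have h0 : ((a :: b :: t)[(1 + 4 * ((0 : Nat) : Int)).toNat]? : Option α) = some b := by
        norm_num
      rw [h0]
      have hdl : (t.drop 2).length = t.length - 2 := by simp
      have hcnt : (((t.drop 2).length : Int) + 2) / 4 = (t.length : Int) / 4 := by
        rw [hdl]; omega
      have hih := ih (t.drop 2) (by omega)
      rw [hcnt] at hih
      have hcong : List.filterMap
            ((fun k : Nat => (a :: b :: t)[(1 + 4 * (k : Int)).toNat]?) ∘ Nat.succ)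
            (List.range ((t.length : Int) / 4).toNat)
          = List.filterMap (fun k : Nat => (t.drop 2)[(1 + 4 * (k : Int)).toNat]?)
            (List.range ((t.length : Int) / 4).toNat) := by
        apply List.filterMap_congr
        intro k _
        simp only [Function.comp]
        have e1 : (1 + 4 * ((Nat.succ k : Nat) : Int)).toNat = (3 + 4 * k) + 1 + 1 := by
          push_cast; omega
        have e2 : (1 + 4 * (k : Int)).toNat = 1 + 4 * k := by omega
        rw [e1, e2, List.getElem?_cons_succ, List.getElem?_cons_succ, List.getElem?_drop]
        congr 1
        omega
      rw [hcong, hih]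
      simp [pvStride4]

lemma pvSlice_eq {α : Type} (l : List α) :
    PySem.List.slice? l (some 1) none 4 = some (pvStride4 l) := by
  rw [pvSlice_filterMap, pvFilterMap_stride l.length l le_rfl]

lemma pvLoopB (zs : List Char) : ∀ (k : Int) (d : PySem.Dict Int String),
    (∀ p ∈ d.items, p.1 < k) →
    ((PySem.List.enumerate zs k).foldl pvStepB d).items = d.items ++ pvCrates zs k := by
  induction zs with
  | nil => intro k d _; simp [PySem.List.enumerate_nil, pvCrates]
  | cons c t ih =>
    intro k d hd
    rw [PySem.List.enumerate_cons]
    simp only [List.foldl_cons]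
    by_cases hc : c = ' '
    · have hs : pvStepB d (k, c) = d := by simp [pvStepB, hc]
      rw [hs, ih (k + 1) d (fun p hp => lt_trans (hd p hp) (by omega))]
      simp [pvCrates, hc]
    · have hnc : d.contains k = false := by
        cases hcon : d.contains k with
        | false => rfl
        | true =>
          exfalso
          have hk : k ∈ d.keys := (PySem.Dict.contains_iff_mem_keys d k).mp hcon
          simp only [PySem.Dict.keys, List.mem_map] at hk
          obtain ⟨p, hp, he⟩ := hk
          have := hd p hp
          omega
      have hs : pvStepB d (k, c) = d.insert k (String.mk [c]) := by simp [pvStepB, hc]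
      have hit : (d.insert k (String.mk [c])).items = d.items ++ [(k, String.mk [c])] :=
        PySem.Dict.items_insert_of_not_contains d _ hnc
      rw [hs, ih (k + 1) _ (by
        intro p hp
        rw [hit] at hp
        rcases List.mem_append.mp hp with h1 | h1
        · have := hd p h1; omega
        · simp at h1; subst h1; simp)]
      rw [hit]
      simp [pvCrates, hc, List.append_assoc]

lemma pvLoopA (N : Nat) : ∀ (l : List Char), l.length ≤ N →
    ∀ (n : Nat) (d : PySem.Dict Int String) (k : Int),
    (∀ p ∈ d.items, p.1 < k) →
    ((PySem.List.enumerate l (4 * (n : Int))).foldl pvStepA (d, k)).1.items =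
      d.items ++ pvCrates (pvStride4 l) k := by
  induction N with
  | zero =>
    intro l hl n d k _
    have : l = [] := List.eq_nil_of_length_eq_zero (by omega)
    subst this
    simp [PySem.List.enumerate_nil, pvStride4, pvCrates]
  | succ N ih =>
    intro l hl n d k hd
    rcases l with _ | ⟨a, _ | ⟨b, t⟩⟩
    · simp [PySem.List.enumerate_nil, pvStride4, pvCrates]
    · rw [PySem.List.enumerate_cons]
      simp only [List.foldl_cons]
      rw [pvStepA_skip (d, k) (4 * (n : Int)) a (by omega)]
      simp [PySem.List.enumerate_nil, pvStride4, pvCrates]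
    · rw [PySem.List.enumerate_cons, PySem.List.enumerate_cons]
      simp only [List.foldl_cons]
      rw [pvStepA_skip (d, k) (4 * (n : Int)) a (by omega)]
      rw [pvStepA_hit (d, k) (4 * (n : Int) + 1) b (by omega)]
      dsimp only
      have hnc : d.contains k = false := by
        cases hcon : d.contains k with
        | false => rfl
        | true =>
          exfalso
          have hk : k ∈ d.keys := (PySem.Dict.contains_iff_mem_keys d k).mp hcon
          simp only [PySem.Dict.keys, List.mem_map] at hk
          obtain ⟨p, hp, he⟩ := hk
          have := hd p hp
          omega
      set d' : PySem.Dict Int String := if b ≠ ' ' then d.insert k (String.mk [b]) else d with hd'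
      have hdi : d'.items = d.items ++ (if b ≠ ' ' then [(k, String.mk [b])] else []) := by
        rw [hd']
        by_cases hb : b = ' '
        · simp [hb]
        · simp only [hb, ne_eq, not_false_iff, if_true]
          exact PySem.Dict.items_insert_of_not_contains d _ hnc
      have hd2 : ∀ p ∈ d'.items, p.1 < k + 1 := by
        intro p hp
        rw [hdi] at hp
        rcases List.mem_append.mp hp with h1 | h1
        · have := hd p h1; omega
        · by_cases hb : b = ' '
          · simp [hb] at h1
          · simp [hb] at h1; subst h1; simp
      rcases t with _ | ⟨c, _ | ⟨e, t2⟩⟩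
      · simp only [PySem.List.enumerate_nil, List.foldl_nil]
        rw [hdi]
        by_cases hb : b = ' ' <;> simp [pvStride4, pvCrates, hb]
      · rw [PySem.List.enumerate_cons]
        simp only [List.foldl_cons]
        rw [pvStepA_skip _ (4 * (n : Int) + 1 + 1) c (by omega)]
        simp only [PySem.List.enumerate_nil, List.foldl_nil]
        rw [hdi]
        by_cases hb : b = ' ' <;> simp [pvStride4, pvCrates, hb]
      · rw [PySem.List.enumerate_cons, PySem.List.enumerate_cons]
        simp only [List.foldl_cons]
        rw [pvStepA_skip _ (4 * (n : Int) + 1 + 1) c (by omega)]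
        rw [pvStepA_skip _ (4 * (n : Int) + 1 + 1 + 1) e (by omega)]
        have harith : (4 * (n : Int)) + 1 + 1 + 1 + 1 = 4 * (((n + 1 : Nat)) : Int) := by
          push_cast; ring
        rw [harith]
        have hih := ih t2 (by simp at hl; omega) (n + 1) d' (k + 1) hd2
        rw [hih, hdi]
        have hstr : pvStride4 (a :: b :: c :: e :: t2) = b :: pvStride4 t2 := by
          simp [pvStride4]
        rw [hstr]
        by_cases hb : b = ' ' <;> simp [pvCrates, hb, List.append_assoc]

theorem read_crates_spec : Claim_equal_read_crates := by
  intro line _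
  unfold Spec_read_crates read_crates read_crates_alt
  rw [pvSlice_eq]
  have hA := pvLoopA line.toList.length line.toList le_rfl 0 PySem.Dict.empty 0 (by simp [PySem.Dict.empty])
  have hB := pvLoopB (pvStride4 line.toList) 0 PySem.Dict.empty (by simp [PySem.Dict.empty])
  simp only [Nat.cast_zero, mul_zero] at hA
  simp only [Option.getD_some]
  rw [hA, hB]
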